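-- pv_equiv track=rewrite | github.com/FILWY2824/LandLords | backend/ai_service/douzero_proxy/adapter.py | _current_lead_move
-- ===== SOURCE A (Python) =====
-- from typing import Iterable, Sequence
--
-- def _current_lead_move(action_seq: Sequence[Sequence[int]]) -> list[int]:
--     trailing_passes = 0
--     for move in reversed(action_seq):
--         if len(move) == 0:
--             trailing_passes += 1
--             continue
--         if trailing_passes >= 2:
--             return []
--         return list(move)
--     return []
-- ===== SOURCE B (Python) =====
-- from typing import Iterable, Sequence
--
-- def _current_lead_move(action_seq: Sequence[Sequence[int]]) -> list[int]:
--     lead: list[int] = []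
--     seen = False
--     passes_since = 0
--     for move in action_seq:
--         if len(move) == 0:
--             passes_since += 1
--         else:
--             lead = list(move)
--             seen = True
--             passes_since = 0
--     if not seen or passes_since >= 2:
--         return []
--     return lead
-- ===== Notes on version B (the rewrite author's own statement) =====
-- stated objective: alternative
-- what changed: Replaced the reverse scan with an early return by a single forward pass that maintains the last non-empty move and a pass counter, deciding the result after the loop.
import Mathlib
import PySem

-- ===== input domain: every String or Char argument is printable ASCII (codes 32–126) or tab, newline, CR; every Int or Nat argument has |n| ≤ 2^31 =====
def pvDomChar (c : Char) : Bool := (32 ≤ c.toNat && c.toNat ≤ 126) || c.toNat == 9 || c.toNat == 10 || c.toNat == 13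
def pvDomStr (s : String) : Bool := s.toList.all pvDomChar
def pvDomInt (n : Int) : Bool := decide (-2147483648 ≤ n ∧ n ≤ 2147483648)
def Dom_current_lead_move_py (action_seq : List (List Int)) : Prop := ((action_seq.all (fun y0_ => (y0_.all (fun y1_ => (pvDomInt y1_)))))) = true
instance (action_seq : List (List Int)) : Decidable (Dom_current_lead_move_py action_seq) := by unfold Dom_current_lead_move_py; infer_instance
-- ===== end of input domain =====

-- B: forward single pass keeping the last non-empty move and a pass counter, instead of A's reverse scan (alternative decomposition; same behaviour).
-- ===== PORT A =====
-- the reverse loop of A, with trailing_passes as explicit state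
def pvALoop (tp : Int) : List (List Int) → List Int
  | [] => []
  | m :: rest =>
      if m.length = 0 then pvALoop (tp + 1) rest
      else if tp ≥ 2 then [] else m

def current_lead_move_py (action_seq : List (List Int)) : List Int :=
  pvALoop 0 action_seq.reverse

-- ===== PORT B =====
-- state: (lead, seen, passes_since)
def pvBStep (st : List Int × Bool × Int) (m : List Int) : List Int × Bool × Int :=
  if m.length = 0 then (st.1, st.2.1, st.2.2 + 1) else (m, true, 0)

def current_lead_move_py_alt (action_seq : List (List Int)) : List Int :=
  let st := action_seq.foldl pvBStep ([], false, 0)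
  if st.2.1 = false ∨ st.2.2 ≥ 2 then [] else st.1

-- ===== PRECONDITION & SPEC =====
def Spec_current_lead_move_py (action_seq : List (List Int)) (out : List Int) : Prop := out = current_lead_move_py_alt action_seq
instance (action_seq : List (List Int)) (out : List Int) : Decidable (Spec_current_lead_move_py action_seq out) := by unfold Spec_current_lead_move_py; infer_instance

-- ===== CLAIM (what is proved, stated in full; the proofs are below) =====
def Claim_equal_current_lead_move_py : Prop := ∀ (action_seq : List (List Int)), Dom_current_lead_move_py action_seq → Spec_current_lead_move_py action_seq (current_lead_move_py action_seq)

-- ===== LEMMAS AND PROOFS =====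


lemma pvKey (xs : List (List Int)) (tp : Int) :
    pvALoop tp xs.reverse =
      (let st := xs.foldl pvBStep ([], false, 0)
       if st.2.1 = false ∨ st.2.2 + tp ≥ 2 then [] else st.1) := by
  induction xs using List.reverseRecOn generalizing tp with
  | nil => simp [pvALoop]
  | append_singleton ys m ih =>
      by_cases hm : m.length = 0
      · simp only [List.reverse_append, List.reverse_singleton, List.singleton_append,
          pvALoop, hm, List.foldl_append, List.foldl_cons, List.foldl_nil]
        rw [ih (tp + 1)]
        simp only [pvBStep, hm, if_pos]
        set st := ys.foldl pvBStep ([], false, 0)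
        have h2 : st.2.2 + (tp + 1) = st.2.2 + 1 + tp := by ring
        rw [h2]
      · simp only [List.reverse_append, List.reverse_singleton, List.singleton_append,
          pvALoop, hm, List.foldl_append, List.foldl_cons, List.foldl_nil, pvBStep]
        by_cases ht : tp ≥ 2 <;> simp [ht]

-- ===== VERDICT (by name: the statement is the Claim_ definition above) =====
theorem current_lead_move_py_spec : Claim_equal_current_lead_move_py := by
  intro seq _
  show current_lead_move_py seq = current_lead_move_py_alt seq
  rw [current_lead_move_py, pvKey seq 0, current_lead_move_py_alt]
  simp
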